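-- pv_equiv track=rewrite | github.com/kwns15/HMTY-Programming | Φροντηστιριακές/Φροντιστηριακή 3.py | evaluate
-- ===== SOURCE A (Python) =====
-- def evaluate(num):
--
--     # επιστρέφουμε True για κάθε δεκτή είσοδο
--     # επιστρέφουμε False για κάθε μη δεκτή είσοδο
--
--     splitChar = None
--     cardNum = []
--
--     i = 0
--
--     for c in num:
--         if not c.isdigit():
--             #έλεγχος αν ο χαρακτήρας διαχωρισμού ειναι δεκτός και σε σωστή θέση
--             if c in '- ' and i % 5 == 4:
--                 if splitChar == None:
--                     splitChar = c
--                 elif c != splitChar: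
--                     return False
--             else:
--                 return False
--         else:
--             # μετατροπή του χαρεκτήρα σε ακέραιο
--             cardNum.append(int(c))
--         i += 1
--
--     # έλεγχος αν τα ψηφία του αριθμού είναι 16
--     if len(cardNum) != 16:
--         return False
--
--
--     # έλεγχος πρώτου ψηφίου
--     if cardNum[0] < 4 or cardNum[0] > 7:
--         return False
--
--     # διπλασιαμός των ψηφίων σε περιττές θέσεις και μερικό άυροισμα τους
--     cardSum = 0
--     for n in cardNum[::2]:
--         n *= 2
--         while n > 9:
--             if n // 10 == 1:
--                 n = 1 + n % 10
--         cardSum += n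
--     # άθροισμα όλωμ των "νέων" ψηφίων
--     cardSum += sum(cardNum[1::2])
--
--     # έλεγχος διαραιτότητας του αποτελέσματος με το 10
--     return cardSum % 10 == 0
-- ===== SOURCE B (Python) =====
-- def evaluate(num):
--     # Chunked validation: the string is cut into 5-character blocks; inside each
--     # block the first four characters must be digits and the fifth (if present)
--     # is either a digit or a separator.  Luhn uses a precomputed doubling table
--     # over digit pairs instead of a doubling-and-reducing loop.
--     DOUBLE = (0, 2, 4, 6, 8, 1, 3, 5, 7, 9)
--     seps = set()
--     digits = []
--     for k in range(0, len(num), 5):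
--         chunk = num[k:k + 5]
--         for c in chunk[:4]:
--             if not c.isdigit():
--                 return False
--             digits.append(int(c))
--         if len(chunk) == 5:
--             c = chunk[4]
--             if c.isdigit():
--                 digits.append(int(c))
--             elif c in '- ':
--                 seps.add(c)
--             else:
--                 return False
--     if len(seps) > 1:
--         return False
--     if len(digits) != 16 or not 4 <= digits[0] <= 7:
--         return False
--     total = 0
--     for j in range(0, 16, 2):
--         total += DOUBLE[digits[j]] + digits[j + 1]
--     return total % 10 == 0
-- ===== Notes on version B (the rewrite author's own statement) =====
-- stated objective: alternative
-- what changed: A's single stateful character scan (index counter with i%5==4 separator test, first-seen splitChar, a doubling while-loop over a slice) is replaced by a block decomposition: the string is cut into 5-character chunks whose first four characters must be digits and whose fifth is a digit or a separator (collected as a set), and the Luhn total is computed over digit pairs with a precomputed doubling table instead of the double-and-reduce loop.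
import Mathlib
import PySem

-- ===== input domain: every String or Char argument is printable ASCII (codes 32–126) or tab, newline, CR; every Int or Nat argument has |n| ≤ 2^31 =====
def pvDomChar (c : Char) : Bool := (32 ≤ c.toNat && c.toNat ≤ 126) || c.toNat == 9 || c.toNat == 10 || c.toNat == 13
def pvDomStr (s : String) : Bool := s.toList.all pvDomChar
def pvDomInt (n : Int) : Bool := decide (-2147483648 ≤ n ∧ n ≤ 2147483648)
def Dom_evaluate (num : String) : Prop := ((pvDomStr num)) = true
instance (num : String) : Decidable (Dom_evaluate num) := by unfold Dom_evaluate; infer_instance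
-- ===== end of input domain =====

-- B replaces A's single indexed character scan by a 5-character-block decomposition
-- (first four chars of each block must be digits, the fifth is a digit or a collected
-- separator) and computes the Luhn total pairwise with a doubling table; same results,
-- no speed claim.

-- int(c) for a single character; both programs apply it only to ASCII digit characters
def pvDigitVal (c : Char) : Int := (PySem.Int.ofChars? [c]).getD 0

-- ===== PORT A =====
-- Python: n *= 2; while n > 9: if n // 10 == 1: n = 1 + n % 10
-- the while body runs at most once here (n = 2*digit ≤ 18, after which 1 + n % 10 ≤ 9),
-- so one conditional step is exact for every value A reaches
def evalStepA (n : Int) : Int :=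
  let n := n * 2
  if 9 < n then (if PySem.Int.floordiv n 10 = 1 then 1 + PySem.Int.mod n 10 else n) else n

-- everything after A's for-loop; cardNum[0] is guarded by the length-16 check, so pyGetD is exact
def evalTailA (cardNum : List Int) : Bool :=
  if cardNum.length ≠ 16 then false
  else if PySem.List.pyGetD cardNum 0 0 < 4 ∨ 7 < PySem.List.pyGetD cardNum 0 0 then false
  else
    let cardSum := ((PySem.List.slice? cardNum none none 2).getD []).foldl
      (fun s n => s + evalStepA n) 0
    let cardSum := cardSum + ((PySem.List.slice? cardNum (some 1) none 2).getD []).foldl (· + ·) 0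
    decide (PySem.Int.mod cardSum 10 = 0)

def evalLoopA : List Char → Option Char → List Int → Int → Bool
  | [], _, cardNum, _ => evalTailA cardNum
  | c :: rest, splitChar, cardNum, i =>
    if ¬ PySem.Chars.isdigit c then
      if ['-', ' '].contains c ∧ PySem.Int.mod i 5 = 4 then
        match splitChar with
        | none => evalLoopA rest (some c) cardNum (i + 1)
        | some s => if c ≠ s then false else evalLoopA rest (some s) cardNum (i + 1)
      else false
    else
      evalLoopA rest splitChar (cardNum ++ [pvDigitVal c]) (i + 1)

def evaluate (num : String) : Bool := evalLoopA num.toList none [] 0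

-- ===== PORT B =====
-- DOUBLE = (0, 2, 4, 6, 8, 1, 3, 5, 7, 9)
def doubleTbl : List Int := [0, 2, 4, 6, 8, 1, 3, 5, 7, 9]

-- inner loop 'for c in chunk[:4]'
def headLoopB : List Char → List Int → Option (List Int)
  | [], digits => some digits
  | c :: rest, digits =>
    if ¬ PySem.Chars.isdigit c then none
    else headLoopB rest (digits ++ [pvDigitVal c])

-- outer loop 'for k in range(0, len(num), 5): chunk = num[k:k+5]; …' transcribed as
-- recursion on the unprocessed suffix (each step handles one 5-character chunk);
-- chunk[4] is guarded by len(chunk) == 5, so getD is exact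
def chunkRecB : List Char → PySem.Set Char → List Int → Option (PySem.Set Char × List Int)
  | [], seps, digits => some (seps, digits)
  | c :: l, seps, digits =>
    let chunk := (c :: l).take 5
    match headLoopB (chunk.take 4) digits with
    | none => none
    | some ds =>
      if chunk.length = 5 then
        let x := chunk.getD 4 ' '
        if PySem.Chars.isdigit x then chunkRecB ((c :: l).drop 5) seps (ds ++ [pvDigitVal x])
        else if ['-', ' '].contains x then chunkRecB ((c :: l).drop 5) (PySem.Set.add seps x) ds
        else none
      else chunkRecB ((c :: l).drop 5) seps ds
termination_by l => l.length
decreasing_by all_goals (simp only [List.length_drop, List.length_cons]; omega)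

-- the two final checks and the pairwise table Luhn loop; digits[0] and the indexed
-- accesses are guarded by the length-16 check, so pyGetD is exact
def bTail (digits : List Int) : Bool :=
  if digits.length ≠ 16 ∨ ¬ (4 ≤ PySem.List.pyGetD digits 0 0 ∧ PySem.List.pyGetD digits 0 0 ≤ 7)
    then false
  else
    let total := (PySem.List.pyRange 0 16 2).foldl
      (fun t j => t + PySem.List.pyGetD doubleTbl (PySem.List.pyGetD digits j 0) 0
                    + PySem.List.pyGetD digits (j + 1) 0) 0
    decide (PySem.Int.mod total 10 = 0)

def evaluate_alt (num : String) : Bool :=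
  match chunkRecB num.toList PySem.Set.empty [] with
  | none => false
  | some (seps, digits) =>
    if 1 < PySem.Set.len seps then false else bTail digits

-- ===== PRECONDITION & SPEC =====
def Spec_evaluate (num : String) (out : Bool) : Prop := out = evaluate_alt num
instance (num : String) (out : Bool) : Decidable (Spec_evaluate num out) := by unfold Spec_evaluate; infer_instance

-- ===== CLAIM (what is proved, stated in full; the proofs are below) =====
def Claim_equal_evaluate : Prop := ∀ (num : String), Dom_evaluate num → Spec_evaluate num (evaluate num)

-- ===== LEMMAS AND PROOFS =====

lemma digit_cases (c : Char) (h : PySem.Chars.isdigit c = true) :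
    c ∈ ['0','1','2','3','4','5','6','7','8','9'] := by
  simp only [PySem.Chars.isdigit, Bool.and_eq_true, decide_eq_true_eq] at h
  obtain ⟨h1, h2⟩ := h
  have hlo : 48 ≤ c.val.toNat := by exact_mod_cast h1
  have hhi : c.val.toNat ≤ 57 := by exact_mod_cast h2
  have hcases : c.val.toNat = 48 ∨ c.val.toNat = 49 ∨ c.val.toNat = 50 ∨ c.val.toNat = 51 ∨
      c.val.toNat = 52 ∨ c.val.toNat = 53 ∨ c.val.toNat = 54 ∨ c.val.toNat = 55 ∨
      c.val.toNat = 56 ∨ c.val.toNat = 57 := by omega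
  rcases hcases with h | h | h | h | h | h | h | h | h | h
  case inl =>
    have hc : c = '0' := Char.ext (UInt32.toNat_inj.mp (by simpa using h))
    simp [hc]
  case inr.inl =>
    have hc : c = '1' := Char.ext (UInt32.toNat_inj.mp (by simpa using h))
    simp [hc]
  case inr.inr.inl =>
    have hc : c = '2' := Char.ext (UInt32.toNat_inj.mp (by simpa using h))
    simp [hc]
  case inr.inr.inr.inl =>
    have hc : c = '3' := Char.ext (UInt32.toNat_inj.mp (by simpa using h))
    simp [hc]
  case inr.inr.inr.inr.inl =>
    have hc : c = '4' := Char.ext (UInt32.toNat_inj.mp (by simpa using h))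
    simp [hc]
  case inr.inr.inr.inr.inr.inl =>
    have hc : c = '5' := Char.ext (UInt32.toNat_inj.mp (by simpa using h))
    simp [hc]
  case inr.inr.inr.inr.inr.inr.inl =>
    have hc : c = '6' := Char.ext (UInt32.toNat_inj.mp (by simpa using h))
    simp [hc]
  case inr.inr.inr.inr.inr.inr.inr.inl =>
    have hc : c = '7' := Char.ext (UInt32.toNat_inj.mp (by simpa using h))
    simp [hc]
  case inr.inr.inr.inr.inr.inr.inr.inr.inl =>
    have hc : c = '8' := Char.ext (UInt32.toNat_inj.mp (by simpa using h))
    simp [hc]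
  case inr.inr.inr.inr.inr.inr.inr.inr.inr =>
    have hc : c = '9' := Char.ext (UInt32.toNat_inj.mp (by simpa using h))
    simp [hc]

lemma digitVal_bounds (c : Char) (h : PySem.Chars.isdigit c = true) :
    0 ≤ pvDigitVal c ∧ pvDigitVal c ≤ 9 := by
  have := digit_cases c h
  fin_cases this <;> decide

lemma stepA_eq (d : Int) (h : 0 ≤ d ∧ d ≤ 9) :
    evalStepA d = (if 4 < d then 2 * d - 9 else 2 * d) := by
  obtain ⟨h1, h2⟩ := h
  interval_cases d <;> decide

lemma tblVal (d : Int) (h : 0 ≤ d ∧ d ≤ 9) :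
    PySem.List.pyGetD doubleTbl d 0 = (if 4 < d then 2 * d - 9 else 2 * d) := by
  obtain ⟨h1, h2⟩ := h
  interval_cases d <;> decide

lemma len_add_ge {s : PySem.Set Char} {c : Char} :
    PySem.Set.len s ≤ PySem.Set.len (PySem.Set.add s c) := by
  simp [PySem.Set.len, PySem.Set.add]
  split <;> simp

lemma head_bounds : ∀ (cs : List Char) (acc ds : List Int),
    headLoopB cs acc = some ds → (∀ x ∈ acc, 0 ≤ x ∧ x ≤ 9) → ∀ x ∈ ds, 0 ≤ x ∧ x ≤ 9 := by
  intro cs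
  induction cs with
  | nil => intro acc ds h hb; simp [headLoopB] at h; simpa [← h] using hb
  | cons c rest ih =>
    intro acc ds h hb
    simp only [headLoopB] at h
    split at h
    · simp at h
    · rename_i hd
      rw [not_not] at hd
      refine ih _ _ h ?_
      intro x hx
      rcases List.mem_append.mp hx with hx | hx
      · exact hb x hx
      · simp at hx; subst hx; exact digitVal_bounds c hd

lemma chunk_mono : ∀ (n : Nat) (l : List Char) (seps s' : PySem.Set Char) (acc d' : List Int),
    l.length ≤ n → chunkRecB l seps acc = some (s', d') →
    PySem.Set.len seps ≤ PySem.Set.len s' := by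
  intro n
  induction n with
  | zero =>
    intro l seps s' acc d' hn h
    have hl : l = [] := List.eq_nil_of_length_eq_zero (Nat.le_zero.mp hn)
    subst hl; simp [chunkRecB] at h; simp [h.1]
  | succ n ih =>
    intro l seps s' acc d' hn h
    match l with
    | [] => simp [chunkRecB] at h; simp [h.1]
    | c :: l =>
      rw [chunkRecB] at h
      simp only at h
      split at h
      · simp at h
      · have hdrop : (List.drop 5 (c :: l)).length ≤ n := by
          simp only [List.length_drop, List.length_cons]
          simp at hn; omega
        split at h
        · split at h
          · exact ih _ _ _ _ _ hdrop h
          · split at h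
            · exact le_trans len_add_ge (ih _ _ _ _ _ hdrop h)
            · simp at h
        · exact ih _ _ _ _ _ hdrop h

lemma chunk_bounds : ∀ (n : Nat) (l : List Char) (seps s' : PySem.Set Char) (acc d' : List Int),
    l.length ≤ n → chunkRecB l seps acc = some (s', d') →
    (∀ x ∈ acc, 0 ≤ x ∧ x ≤ 9) → ∀ x ∈ d', 0 ≤ x ∧ x ≤ 9 := by
  intro n
  induction n with
  | zero =>
    intro l seps s' acc d' hn h hb
    have hl : l = [] := List.eq_nil_of_length_eq_zero (Nat.le_zero.mp hn)
    subst hl; simp [chunkRecB] at h; simpa [← h.2] using hb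
  | succ n ih =>
    intro l seps s' acc d' hn h hb
    match l with
    | [] => simp [chunkRecB] at h; simpa [← h.2] using hb
    | c :: l =>
      rw [chunkRecB] at h
      simp only at h
      split at h
      · simp at h
      · rename_i ds hds
        have hdb : ∀ x ∈ ds, 0 ≤ x ∧ x ≤ 9 := head_bounds _ _ _ hds hb
        have hdrop : (List.drop 5 (c :: l)).length ≤ n := by
          simp only [List.length_drop, List.length_cons]
          simp at hn; omega
        split at h
        · split at h
          · rename_i hx
            refine ih _ _ _ _ _ hdrop h ?_
            intro x hxm
            rcases List.mem_append.mp hxm with hxm | hxm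
            · exact hdb x hxm
            · simp at hxm; subst hxm; exact digitVal_bounds _ (by simpa using hx)
          · split at h
            · exact ih _ _ _ _ _ hdrop h hdb
            · simp at h
        · exact ih _ _ _ _ _ hdrop h hdb

lemma run4 : ∀ (cs : List Char) (i : Int) (sc : Option Char) (acc : List Int) (rest : List Char),
    (∀ k : Nat, k < cs.length → PySem.Int.mod (i + k) 5 ≠ 4) →
    evalLoopA (cs ++ rest) sc acc i =
      (match headLoopB cs acc with
       | none => false
       | some ds => evalLoopA rest sc ds (i + cs.length)) := by
  intro cs
  induction cs with
  | nil => intro i sc acc rest h; simp [headLoopB]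
  | cons c cs ih =>
    intro i sc acc rest h
    by_cases hd : PySem.Chars.isdigit c = true
    · show evalLoopA (c :: (cs ++ rest)) sc acc i = _
      have hstep : evalLoopA (c :: (cs ++ rest)) sc acc i
          = evalLoopA (cs ++ rest) sc (acc ++ [pvDigitVal c]) (i + 1) := by
        simp [evalLoopA, hd]
      rw [hstep]
      have h' : ∀ k : Nat, k < cs.length → PySem.Int.mod (i + 1 + k) 5 ≠ 4 := by
        intro k hk
        have := h (k + 1) (by simpa using Nat.succ_lt_succ hk)
        have harg : i + 1 + (k : Int) = i + ((k + 1 : Nat) : Int) := by push_cast; ring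
        rw [harg]; exact this
      rw [ih (i + 1) sc (acc ++ [pvDigitVal c]) rest h']
      cases hh : headLoopB cs (acc ++ [pvDigitVal c]) with
      | none => simp [headLoopB, hd, hh]
      | some ds =>
        have harg : i + 1 + (cs.length : Int) = i + ((c :: cs).length : Int) := by
          simp only [List.length_cons]; push_cast; ring
        simp [headLoopB, hd, hh, harg]
    · have h0 : PySem.Int.mod i 5 ≠ 4 := by
        have := h 0 (by simp)
        simpa using this
      rw [PySem.Int.mod_eq_emod_of_pos (by norm_num)] at h0
      show evalLoopA (c :: (cs ++ rest)) sc acc i = _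
      simp [evalLoopA, hd, headLoopB, h0]

lemma hadd_ne (s c : Char) (h : c ≠ s) : PySem.Set.add ([s] : PySem.Set Char) c = [s, c] := by
  simp [PySem.Set.add, PySem.Set.contains]
  intro hh; exact h hh

lemma loop_eq : ∀ (n : Nat) (l : List Char), l.length ≤ n →
    ∀ (i : Int) (sc : Option Char) (seps : PySem.Set Char) (acc : List Int),
    0 ≤ i → PySem.Int.mod i 5 = 0 →
    ((sc = none ∧ seps = []) ∨ (∃ s, sc = some s ∧ seps = [s])) →
    evalLoopA l sc acc i =
      (match chunkRecB l seps acc with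
       | none => false
       | some p => if 1 < PySem.Set.len p.1 then false else evalTailA p.2) := by
  intro n
  induction n with
  | zero =>
    intro l hn i sc seps acc hi him hinv
    have hl : l = [] := List.eq_nil_of_length_eq_zero (Nat.le_zero.mp hn)
    subst hl
    show evalTailA acc = _
    rcases hinv with ⟨_, rfl⟩ | ⟨s, _, rfl⟩ <;> simp [chunkRecB, PySem.Set.len]
  | succ n ih =>
    intro l hn i sc seps acc hi him hinv
    have hm : ∀ a : Int, PySem.Int.mod a 5 = a % 5 :=
      fun a => PySem.Int.mod_eq_emod_of_pos (by norm_num)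
    rw [hm] at him
    rcases l with _ | ⟨c, l'⟩
    · show evalTailA acc = _
      rcases hinv with ⟨_, rfl⟩ | ⟨s, _, rfl⟩ <;> simp [chunkRecB, PySem.Set.len]
    · -- process the first min(4, length) characters uniformly
      have htk4 : (List.take 5 (c :: l')).take 4 = (c :: l').take 4 := by
        rw [List.take_take]; norm_num
      have hlen4le : ((c :: l').take 4).length ≤ 4 := by
        simp [List.length_take]
      have hfour : ∀ k : Nat, k < ((c :: l').take 4).length → PySem.Int.mod (i + k) 5 ≠ 4 := by
        intro k hk
        have hk4 : k < 4 := lt_of_lt_of_le hk hlen4le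
        rw [hm]; omega
      have hsplit := List.take_append_drop 4 (c :: l')
      conv_lhs => rw [← hsplit]
      rw [run4 _ i sc acc _ hfour]
      rw [chunkRecB]
      simp only [htk4]
      cases hh : headLoopB ((c :: l').take 4) acc with
      | none => simp
      | some ds =>
        simp only []
        by_cases h5 : (List.take 5 (c :: l')).length = 5
        · -- a full chunk: there is a fifth character
          have hlen5 : 5 ≤ (c :: l').length := by
            have ht : (List.take 5 (c :: l')).length = min 5 (c :: l').length :=
              List.length_take
            rw [h5] at ht
            omega
          obtain ⟨c4, rest, hdr⟩ : ∃ c4 rest, (c :: l').drop 4 = c4 :: rest := by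
            have hlend : (List.drop 4 (c :: l')).length = (c :: l').length - 4 := by simp
            rcases hx : (c :: l').drop 4 with _ | ⟨a, b⟩
            · exfalso
              have hc0 := congrArg List.length hx
              rw [hlend] at hc0
              simp only [List.length_nil, List.length_cons] at hc0 hlen5
              omega
            · exact ⟨a, b, rfl⟩
          have hrest : (c :: l').drop 5 = rest := by
            have hdd : (c :: l').drop 5 = ((c :: l').drop 4).drop 1 := by
              rw [List.drop_drop]
            rw [hdd, hdr]; rfl
          have hc4' : l'[3]? = some c4 := by
            have hdr' : l'.drop 3 = c4 :: rest := by simpa using hdr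
            rw [← List.head?_drop, hdr']; rfl
          have hx4 : (List.take 5 (c :: l')).getD 4 ' ' = c4 := by
            simp [List.getD, hc4']
          have hlt4 : ((c :: l').take 4).length = 4 := by
            rw [List.length_take]
            simp only [List.length_cons] at hlen5 ⊢
            omega
          have hrlen : rest.length ≤ n := by
            have h1 : (List.drop 4 (c :: l')).length = (c :: l').length - 4 := by simp
            rw [hdr] at h1
            simp at h1 hn
            omega
          rw [hdr]
          simp only [if_pos h5, hx4, hrest, hlt4]
          have hmod4 : PySem.Int.mod (i + 4) 5 = 4 := by rw [hm]; omega
          by_cases hd4 : PySem.Chars.isdigit c4 = true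
          · have hstep : evalLoopA (c4 :: rest) sc ds (i + ((4 : Nat) : Int)) =
                evalLoopA rest sc (ds ++ [pvDigitVal c4]) (i + ((4 : Nat) : Int) + 1) := by
              simp [evalLoopA, hd4]
            rw [hstep, show i + ((4 : Nat) : Int) + 1 = i + 5 by push_cast; ring]
            rw [ih rest hrlen (i + 5) sc seps (ds ++ [pvDigitVal c4]) (by omega)
              (by rw [hm]; omega) hinv]
            simp [hd4]
          · by_cases hc : (['-', ' '].contains c4) = true
            · rcases hinv with ⟨hsc, hseps⟩ | ⟨s, hsc, hseps⟩
              · subst hsc; subst hseps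
                have hstep : evalLoopA (c4 :: rest) none ds (i + ((4 : Nat) : Int)) =
                    evalLoopA rest (some c4) ds (i + ((4 : Nat) : Int) + 1) := by
                  show (if ¬PySem.Chars.isdigit c4 = true then _ else _) = _
                  rw [if_pos hd4, if_pos ⟨hc, by push_cast; exact hmod4⟩]
                rw [hstep, show i + ((4 : Nat) : Int) + 1 = i + 5 by push_cast; ring]
                rw [ih rest hrlen (i + 5) (some c4) [c4] ds (by omega) (by rw [hm]; omega)
                  (Or.inr ⟨c4, rfl, rfl⟩)]
                have hc' : c4 = '-' ∨ c4 = ' ' := by simpa using hc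
                rcases hc' with hce | hce <;> (subst hce; simp [hd4])
              · subst hsc; subst hseps
                by_cases hcs : c4 = s
                · subst hcs
                  have hstep : evalLoopA (c4 :: rest) (some c4) ds (i + ((4 : Nat) : Int)) =
                      evalLoopA rest (some c4) ds (i + ((4 : Nat) : Int) + 1) := by
                    show (if ¬PySem.Chars.isdigit c4 = true then _ else _) = _
                    rw [if_pos hd4, if_pos ⟨hc, by push_cast; exact hmod4⟩]
                    simp
                  rw [hstep, show i + ((4 : Nat) : Int) + 1 = i + 5 by push_cast; ring]
                  rw [ih rest hrlen (i + 5) (some c4) [c4] ds (by omega) (by rw [hm]; omega)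
                    (Or.inr ⟨c4, rfl, rfl⟩)]
                  have hc' : c4 = '-' ∨ c4 = ' ' := by simpa using hc
                  rcases hc' with hce | hce <;> (subst hce; simp [hd4])
                · have hstep : evalLoopA (c4 :: rest) (some s) ds (i + ((4 : Nat) : Int)) =
                      false := by
                    show (if ¬PySem.Chars.isdigit c4 = true then _ else _) = _
                    rw [if_pos hd4, if_pos ⟨hc, by push_cast; exact hmod4⟩]
                    simp [hcs]
                  rw [hstep]
                  rw [show (if PySem.Chars.isdigit c4 = true then
                        chunkRecB rest [s] (ds ++ [pvDigitVal c4])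
                      else if (['-', ' '].contains c4) = true then
                        chunkRecB rest (PySem.Set.add [s] c4) ds
                      else none) = chunkRecB rest [s, c4] ds from by
                    rw [if_neg hd4, if_pos hc, hadd_ne s c4 hcs]]
                  cases hcr : chunkRecB rest [s, c4] ds with
                  | none => simp
                  | some p =>
                    have hmono := chunk_mono rest.length rest _ _ _ _ le_rfl hcr
                    have hgtI : (1 : Int) < PySem.Set.len p.1 := by
                      simp only [PySem.Set.len, List.length_cons, List.length_nil] at hmono ⊢
                      omega
                    show false = if 1 < PySem.Set.len p.1 then false else evalTailA p.2
                    rw [if_pos hgtI]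
            · have hc' : ¬ (c4 = '-' ∨ c4 = ' ') := by simpa using hc
              have hstep : evalLoopA (c4 :: rest) sc ds (i + ((4 : Nat) : Int)) = false := by
                simp [evalLoopA, hd4, hc']
              rw [hstep]
              simp [hd4, hc']
        · -- a short final chunk: the whole list was consumed by headLoopB
          have hlen4 : (c :: l').length ≤ 4 := by
            have ht : (List.take 5 (c :: l')).length = min 5 (c :: l').length :=
              List.length_take
            omega
          have hdrop4 : (c :: l').drop 4 = [] := List.drop_eq_nil_of_le hlen4
          have hdrop5 : (c :: l').drop 5 = [] := List.drop_eq_nil_of_le (by omega)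
          rw [hdrop4]
          simp only [if_neg h5, hdrop5, chunkRecB]
          show evalTailA ds = _
          rcases hinv with ⟨_, rfl⟩ | ⟨s, _, rfl⟩ <;> simp [PySem.Set.len]

lemma tail_eq (ds : List Int) (hb : ∀ d ∈ ds, 0 ≤ d ∧ d ≤ 9) :
    evalTailA ds = bTail ds := by
  by_cases hl : ds.length = 16
  case neg => simp [evalTailA, bTail, hl]
  rcases ds with _ | ⟨d0, ds⟩
  · exact absurd hl (by simp)
  rcases ds with _ | ⟨d1, ds⟩
  · exact absurd hl (by simp)
  rcases ds with _ | ⟨d2, ds⟩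
  · exact absurd hl (by simp)
  rcases ds with _ | ⟨d3, ds⟩
  · exact absurd hl (by simp)
  rcases ds with _ | ⟨d4, ds⟩
  · exact absurd hl (by simp)
  rcases ds with _ | ⟨d5, ds⟩
  · exact absurd hl (by simp)
  rcases ds with _ | ⟨d6, ds⟩
  · exact absurd hl (by simp)
  rcases ds with _ | ⟨d7, ds⟩
  · exact absurd hl (by simp)
  rcases ds with _ | ⟨d8, ds⟩
  · exact absurd hl (by simp)
  rcases ds with _ | ⟨d9, ds⟩
  · exact absurd hl (by simp)
  rcases ds with _ | ⟨d10, ds⟩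
  · exact absurd hl (by simp)
  rcases ds with _ | ⟨d11, ds⟩
  · exact absurd hl (by simp)
  rcases ds with _ | ⟨d12, ds⟩
  · exact absurd hl (by simp)
  rcases ds with _ | ⟨d13, ds⟩
  · exact absurd hl (by simp)
  rcases ds with _ | ⟨d14, ds⟩
  · exact absurd hl (by simp)
  rcases ds with _ | ⟨d15, ds⟩
  · exact absurd hl (by simp)
  rcases ds with _ | ⟨x, ds⟩
  swap
  · simp at hl
  have h0 := hb d0 (by simp)
  have h2 := hb d2 (by simp)
  have h4 := hb d4 (by simp)
  have h6 := hb d6 (by simp)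
  have h8 := hb d8 (by simp)
  have h10 := hb d10 (by simp)
  have h12 := hb d12 (by simp)
  have h14 := hb d14 (by simp)
  have hs1 : PySem.List.slice? [d0,d1,d2,d3,d4,d5,d6,d7,d8,d9,d10,d11,d12,d13,d14,d15] none none 2 = some [d0,d2,d4,d6,d8,d10,d12,d14] := by
    simp [PySem.List.slice?, PySem.List.sliceIndices, List.range_succ]
  have hs2 : PySem.List.slice? [d0,d1,d2,d3,d4,d5,d6,d7,d8,d9,d10,d11,d12,d13,d14,d15] (some 1) none 2 = some [d1,d3,d5,d7,d9,d11,d13,d15] := by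
    simp [PySem.List.slice?, PySem.List.sliceIndices, List.range_succ]
  have hr : PySem.List.pyRange 0 16 2 = [(0:Int),2,4,6,8,10,12,14] := by decide
  have g0 : PySem.List.pyGetD ([d0,d1,d2,d3,d4,d5,d6,d7,d8,d9,d10,d11,d12,d13,d14,d15] : List Int) ((0 : Int)) 0 = d0 := rfl
  have g1 : PySem.List.pyGetD ([d0,d1,d2,d3,d4,d5,d6,d7,d8,d9,d10,d11,d12,d13,d14,d15] : List Int) ((1 : Int)) 0 = d1 := rfl
  have g2 : PySem.List.pyGetD ([d0,d1,d2,d3,d4,d5,d6,d7,d8,d9,d10,d11,d12,d13,d14,d15] : List Int) ((2 : Int)) 0 = d2 := rfl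
  have g3 : PySem.List.pyGetD ([d0,d1,d2,d3,d4,d5,d6,d7,d8,d9,d10,d11,d12,d13,d14,d15] : List Int) ((3 : Int)) 0 = d3 := rfl
  have g4 : PySem.List.pyGetD ([d0,d1,d2,d3,d4,d5,d6,d7,d8,d9,d10,d11,d12,d13,d14,d15] : List Int) ((4 : Int)) 0 = d4 := rfl
  have g5 : PySem.List.pyGetD ([d0,d1,d2,d3,d4,d5,d6,d7,d8,d9,d10,d11,d12,d13,d14,d15] : List Int) ((5 : Int)) 0 = d5 := rfl
  have g6 : PySem.List.pyGetD ([d0,d1,d2,d3,d4,d5,d6,d7,d8,d9,d10,d11,d12,d13,d14,d15] : List Int) ((6 : Int)) 0 = d6 := rfl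
  have g7 : PySem.List.pyGetD ([d0,d1,d2,d3,d4,d5,d6,d7,d8,d9,d10,d11,d12,d13,d14,d15] : List Int) ((7 : Int)) 0 = d7 := rfl
  have g8 : PySem.List.pyGetD ([d0,d1,d2,d3,d4,d5,d6,d7,d8,d9,d10,d11,d12,d13,d14,d15] : List Int) ((8 : Int)) 0 = d8 := rfl
  have g9 : PySem.List.pyGetD ([d0,d1,d2,d3,d4,d5,d6,d7,d8,d9,d10,d11,d12,d13,d14,d15] : List Int) ((9 : Int)) 0 = d9 := rfl
  have g10 : PySem.List.pyGetD ([d0,d1,d2,d3,d4,d5,d6,d7,d8,d9,d10,d11,d12,d13,d14,d15] : List Int) ((10 : Int)) 0 = d10 := rfl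
  have g11 : PySem.List.pyGetD ([d0,d1,d2,d3,d4,d5,d6,d7,d8,d9,d10,d11,d12,d13,d14,d15] : List Int) ((11 : Int)) 0 = d11 := rfl
  have g12 : PySem.List.pyGetD ([d0,d1,d2,d3,d4,d5,d6,d7,d8,d9,d10,d11,d12,d13,d14,d15] : List Int) ((12 : Int)) 0 = d12 := rfl
  have g13 : PySem.List.pyGetD ([d0,d1,d2,d3,d4,d5,d6,d7,d8,d9,d10,d11,d12,d13,d14,d15] : List Int) ((13 : Int)) 0 = d13 := rfl
  have g14 : PySem.List.pyGetD ([d0,d1,d2,d3,d4,d5,d6,d7,d8,d9,d10,d11,d12,d13,d14,d15] : List Int) ((14 : Int)) 0 = d14 := rfl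
  have g15 : PySem.List.pyGetD ([d0,d1,d2,d3,d4,d5,d6,d7,d8,d9,d10,d11,d12,d13,d14,d15] : List Int) ((15 : Int)) 0 = d15 := rfl
  by_cases hfirst : 4 ≤ d0 ∧ d0 ≤ 7
  case neg =>
    simp only [evalTailA, bTail, g0]
    rw [if_neg (show ¬ (([d0,d1,d2,d3,d4,d5,d6,d7,d8,d9,d10,d11,d12,d13,d14,d15] : List Int).length ≠ 16) by simp),
      if_pos (show d0 < 4 ∨ 7 < d0 by omega),
      if_pos (Or.inr hfirst :
        ([d0,d1,d2,d3,d4,d5,d6,d7,d8,d9,d10,d11,d12,d13,d14,d15] : List Int).length ≠ 16 ∨ ¬ (4 ≤ d0 ∧ d0 ≤ 7))]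
  case pos =>
    simp only [evalTailA, bTail, g0]
    rw [if_neg (show ¬ (([d0,d1,d2,d3,d4,d5,d6,d7,d8,d9,d10,d11,d12,d13,d14,d15] : List Int).length ≠ 16) by simp),
      if_neg (show ¬ (d0 < 4 ∨ 7 < d0) by omega),
      if_neg (show ¬ (([d0,d1,d2,d3,d4,d5,d6,d7,d8,d9,d10,d11,d12,d13,d14,d15] : List Int).length ≠ 16 ∨ ¬ (4 ≤ d0 ∧ d0 ≤ 7)) by
        simp [hfirst.1, hfirst.2])]
    simp only [hs1, hs2, hr, Option.getD_some, List.foldl,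
      g0, g1, g2, g3, g4, g5, g6, g7, g8, g9, g10, g11, g12, g13, g14, g15,
      show ((0:Int)+1 : Int) = 1 from by norm_num, show ((2:Int)+1 : Int) = 3 from by norm_num,
      show ((4:Int)+1 : Int) = 5 from by norm_num, show ((6:Int)+1 : Int) = 7 from by norm_num,
      show ((8:Int)+1 : Int) = 9 from by norm_num, show ((10:Int)+1 : Int) = 11 from by norm_num,
      show ((12:Int)+1 : Int) = 13 from by norm_num, show ((14:Int)+1 : Int) = 15 from by norm_num]
    rw [stepA_eq d0 h0, stepA_eq d2 h2, stepA_eq d4 h4, stepA_eq d6 h6, stepA_eq d8 h8,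
      stepA_eq d10 h10, stepA_eq d12 h12, stepA_eq d14 h14,
      tblVal d0 h0, tblVal d2 h2, tblVal d4 h4, tblVal d6 h6, tblVal d8 h8,
      tblVal d10 h10, tblVal d12 h12, tblVal d14 h14]
    congr 2
    congr 1
    ring

-- ===== VERDICT (by name: the statement is the Claim_ definition above) =====
theorem evaluate_spec : Claim_equal_evaluate := by
  intro num _
  unfold Spec_evaluate
  show evalLoopA num.toList none [] 0 = evaluate_alt num
  rw [loop_eq num.toList.length num.toList le_rfl 0 none PySem.Set.empty []
    (by norm_num) (by decide) (Or.inl ⟨rfl, rfl⟩)]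
  unfold evaluate_alt
  cases hcr : chunkRecB num.toList PySem.Set.empty [] with
  | none => rfl
  | some p =>
    obtain ⟨s', d'⟩ := p
    simp only []
    split
    · rfl
    · exact tail_eq d'
        (chunk_bounds num.toList.length num.toList _ _ _ _ le_rfl hcr (by simp))
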